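-- pv_equiv track=rewrite | github.com/pypi-data/pypi-mirror-4 | packages/dvipy/dvipy-0.0.1.tar.gz/dvipy-0.0.1/dvipy/fontmap.py | load_requested
-- ===== SOURCE A (Python) =====
-- def tokenize(line):
--     # Words are separated by space or tabs, unless double quote in which
--     # case extends to either next double quote or end of the line
--     a = 0
--     in_string = False
--     for index, char in enumerate(line):
--         if char == '"':
--             if in_string:
--                 in_string = False
--                 yield line[a:index+1]
--                 a = index + 1
--             else:
--                 in_string = True
--
--         elif char == ' ' and not in_string:
--             b = index
--             if a < b:
--                 yield line[a:b]
--             a = index + 1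
--
--     if a < index and not in_string:
--         yield line[a:]
--
--     if in_string:
--         yield line[a:]
--
-- def load_requested(r):
--     line = tuple(tokenize(r))
--     encodings = []
--     pfbs = []
--     tfms = []
--     in_gt = False
--     for i in line:
--         if in_gt:
--             in_gt = False
--             r = i
--             if r.endswith('.enc'):
--                 encodings.append(r)
--             elif r.endswith('.pfb'):
--                 pfbs.append(r)
--         else:
--
--             if i == '<':
--                 in_gt = True
--                 continue
--
--             elif i.startswith('<<'):
--                 r = i[2:]
--                 if r.endswith('.pfb'):
--                     pfbs.append(r)
--                 elif r.endswith('.pfa'):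
--                     pfbs.append(r)
--                 else:
--                     raise RuntimeError('Incorrect psfont.map', i)
--
--             elif i.startswith('<['):
--                 r = i[2:]
--                 encodings.append(r)
--
--             elif i.startswith('<'):
--                 r = i[1:]
--                 if r.endswith('.enc'):
--                     encodings.append(r)
--                 elif r.endswith('.pfb'):
--                     pfbs.append(r)
--                 elif r.endswith('.pfa'):
--                     pfbs.append(r)
--                 else:
--                     raise RuntimeError('Incorrect psfont.map', i)
--
--             elif i.startswith('<['):
--                 encodings.append(i[2:])
--
--     return pfbs, encodings
-- ===== SOURCE B (Python) =====
-- def tokenize(line):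
--     # Words are separated by space or tabs, unless double quote in which
--     # case extends to either next double quote or end of the line
--     a = 0
--     in_string = False
--     for index, char in enumerate(line):
--         if char == '"':
--             if in_string:
--                 in_string = False
--                 yield line[a:index+1]
--                 a = index + 1
--             else:
--                 in_string = True
--
--         elif char == ' ' and not in_string:
--             b = index
--             if a < b:
--                 yield line[a:b]
--             a = index + 1
--
--     if a < index and not in_string:
--         yield line[a:]
--
--     if in_string:
--         yield line[a:]
--
--
-- def classify(toks):
--     # Stage 1: recursively turn the token list into a tagged event stream
--     # [('pfb', name), ('enc', name), ...]; a bare '<' consumes the next token.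
--     if not toks:
--         return []
--     i = toks[0]
--     rest = toks[1:]
--     if i == '<':
--         if not rest:
--             return []
--         t = rest[0]
--         if t.endswith('.enc'):
--             ev = [('enc', t)]
--         elif t.endswith('.pfb'):
--             ev = [('pfb', t)]
--         else:
--             ev = []
--         return ev + classify(rest[1:])
--     if i.startswith('<<'):
--         s = i[2:]
--         if s.endswith('.pfb') or s.endswith('.pfa'):
--             return [('pfb', s)] + classify(rest)
--         raise RuntimeError('Incorrect psfont.map', i)
--     if i.startswith('<['):
--         return [('enc', i[2:])] + classify(rest)
--     if i.startswith('<'):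
--         s = i[1:]
--         if s.endswith('.enc'):
--             return [('enc', s)] + classify(rest)
--         if s.endswith('.pfb') or s.endswith('.pfa'):
--             return [('pfb', s)] + classify(rest)
--         raise RuntimeError('Incorrect psfont.map', i)
--     return classify(rest)
--
--
-- def load_requested(r):
--     # Stage 2: partition the tagged event stream into the two result lists.
--     events = classify(list(tokenize(r)))
--     pfbs = [name for kind, name in events if kind == 'pfb']
--     encodings = [name for kind, name in events if kind == 'enc']
--     return pfbs, encodings
-- ===== Notes on version B (the rewrite author's own statement) =====
-- stated objective: alternative
-- what changed: Replaces A's single in_gt-flag accumulation loop by two stages: a recursive classifier that turns the token list into a tagged event stream (a bare '<' consumes its lookahead token), then two filtering comprehensions partition the stream into pfbs and encodings.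
import Mathlib
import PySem

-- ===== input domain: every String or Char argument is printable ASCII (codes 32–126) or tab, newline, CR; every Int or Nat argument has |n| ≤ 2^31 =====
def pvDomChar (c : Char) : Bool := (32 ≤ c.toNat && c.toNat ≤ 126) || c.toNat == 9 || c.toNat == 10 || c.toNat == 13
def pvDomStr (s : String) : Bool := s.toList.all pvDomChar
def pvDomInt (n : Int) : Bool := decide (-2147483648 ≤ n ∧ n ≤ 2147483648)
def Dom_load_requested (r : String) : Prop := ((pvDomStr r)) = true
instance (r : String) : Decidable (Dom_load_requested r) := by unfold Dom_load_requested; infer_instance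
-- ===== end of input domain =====

-- B replaces A's single in_gt-flagged accumulation loop by two stages: a recursive
-- classifier producing a tagged event stream, then a partition of that stream
-- (objective: alternative decomposition, same cost).

-- ===== PORT A =====

-- shared helper: the generator 'tokenize' (identical in A and in B).
-- Python slices line[a:b] are PySem.List.slice (exact); the generator's yields are
-- collected in order in 'out'.  On line = '' Python raises NameError ('index'
-- unbound after the empty loop); that input is excluded by Pre_load_requested.
def tokenize (line : String) : List String :=
  let cs := line.toList
  let st := (PySem.List.enumerate cs 0).foldl
    (fun (st : Int × Bool × List String) (p : Int × Char) =>
      let (a, in_string, out) := st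
      let (index, char) := p
      if char = '"' then
        if in_string then
          (index + 1, false, out ++ [String.ofList (PySem.List.slice cs (some a) (some (index + 1)))])
        else (a, true, out)
      else if char = ' ' && !in_string then
        if a < index then (index + 1, in_string, out ++ [String.ofList (PySem.List.slice cs (some a) (some index))])
        else (index + 1, in_string, out)
      else (a, in_string, out))
    (0, false, [])
  let (a, in_string, out) := st
  let index : Int := (cs.length : Int) - 1
  let out := if a < index && !in_string then out ++ [String.ofList (PySem.List.slice cs (some a) none)] else out
  if in_string then out ++ [String.ofList (PySem.List.slice cs (some a) none)] else out

-- A's loop body; state = (encodings, pfbs, in_gt) in Python declaration order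
-- (the unused 'tfms = []' of A is omitted: it is never touched nor returned).
-- In the branches where Python raises RuntimeError the state is returned
-- unchanged; those inputs are excluded by Pre_load_requested.
def stepA (st : List String × List String × Bool) (i : String) : List String × List String × Bool :=
  let (encodings, pfbs, in_gt) := st
  if in_gt then
    if PySem.Str.endswith i ".enc" then (encodings ++ [i], pfbs, false)
    else if PySem.Str.endswith i ".pfb" then (encodings, pfbs ++ [i], false)
    else (encodings, pfbs, false)
  else if i = "<" then (encodings, pfbs, true)
  else if PySem.Str.startswith i "<<" then
    let r := PySem.Str.slice i (some 2) none
    if PySem.Str.endswith r ".pfb" then (encodings, pfbs ++ [r], false)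
    else if PySem.Str.endswith r ".pfa" then (encodings, pfbs ++ [r], false)
    else st  -- Python raises RuntimeError here; excluded by Pre_load_requested
  else if PySem.Str.startswith i "<[" then (encodings ++ [PySem.Str.slice i (some 2) none], pfbs, false)
  else if PySem.Str.startswith i "<" then
    let r := PySem.Str.slice i (some 1) none
    if PySem.Str.endswith r ".enc" then (encodings ++ [r], pfbs, false)
    else if PySem.Str.endswith r ".pfb" then (encodings, pfbs ++ [r], false)
    else if PySem.Str.endswith r ".pfa" then (encodings, pfbs ++ [r], false)
    else st  -- Python raises RuntimeError here; excluded by Pre_load_requested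
  else if PySem.Str.startswith i "<[" then (encodings ++ [PySem.Str.slice i (some 2) none], pfbs, false)  -- dead branch, kept from A
  else st

def load_requested (r : String) : List String × List String :=
  let line := tokenize r
  let st := line.foldl stepA ([], [], false)
  (st.2.1, st.1)

-- ===== PORT B =====

-- Stage 1 of B: the recursive classifier turning the token list into a tagged
-- event stream [("pfb", name), ("enc", name), …]; a bare '<' consumes the next
-- token (the raise branches return the stream unchanged; excluded by Pre_).
def classifyB : List String → List (String × String)
  | [] => []
  | i :: rest =>
    if i = "<" then
      match rest with
      | [] => []
      | t :: rest2 =>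
        (if PySem.Str.endswith t ".enc" then [("enc", t)]
         else if PySem.Str.endswith t ".pfb" then [("pfb", t)]
         else []) ++ classifyB rest2
    else if PySem.Str.startswith i "<<" then
      let s := PySem.Str.slice i (some 2) none
      if PySem.Str.endswith s ".pfb" || PySem.Str.endswith s ".pfa" then ("pfb", s) :: classifyB rest
      else classifyB rest  -- Python raises RuntimeError here; excluded by Pre_load_requested
    else if PySem.Str.startswith i "<[" then ("enc", PySem.Str.slice i (some 2) none) :: classifyB rest
    else if PySem.Str.startswith i "<" then
      let s := PySem.Str.slice i (some 1) none
      if PySem.Str.endswith s ".enc" then ("enc", s) :: classifyB rest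
      else if PySem.Str.endswith s ".pfb" || PySem.Str.endswith s ".pfa" then ("pfb", s) :: classifyB rest
      else classifyB rest  -- Python raises RuntimeError here; excluded by Pre_load_requested
    else classifyB rest

-- Stage 2 of B: partition the event stream into the two result lists.
def load_requested_alt (r : String) : List String × List String :=
  let events := classifyB (tokenize r)
  ((events.filter (fun p => p.1 == "pfb")).map Prod.snd,
   (events.filter (fun p => p.1 == "enc")).map Prod.snd)

-- ===== PRECONDITION & SPEC =====

-- A token that does not make load_requested raise RuntimeError when examined
-- outside the '<'-lookahead position.
def validTok (i : String) : Bool :=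
  if PySem.Str.startswith i "<<" then
    PySem.Str.endswith (PySem.Str.slice i (some 2) none) ".pfb" ||
    PySem.Str.endswith (PySem.Str.slice i (some 2) none) ".pfa"
  else if PySem.Str.startswith i "<[" then true
  else if PySem.Str.startswith i "<" && !(i = "<" : Bool) then
    PySem.Str.endswith (PySem.Str.slice i (some 1) none) ".enc" ||
    PySem.Str.endswith (PySem.Str.slice i (some 1) none) ".pfb" ||
    PySem.Str.endswith (PySem.Str.slice i (some 1) none) ".pfa"
  else true

-- Every token is valid, except that the token immediately after a bare '<'
-- (A's in_gt position) is never inspected for errors and so is exempt.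
def okToks : List String → Bool
  | [] => true
  | [i] => if i = "<" then true else validTok i
  | i :: t :: rest => if i = "<" then okToks rest else validTok i && okToks (t :: rest)

-- Pre_ excludes exactly the inputs on which the Python A raises: the empty
-- string (NameError inside tokenize) and lines with a token on which
-- load_requested raises RuntimeError in its branch dispatch.
def Pre_load_requested (r : String) : Prop :=
  r ≠ "" ∧ okToks (tokenize r) = true
instance (r : String) : Decidable (Pre_load_requested r) := by unfold Pre_load_requested; infer_instance

def pvWitness_load_requested : String := "< a.enc <<b.pfb x"

def Spec_load_requested (r : String) (out : List String × List String) : Prop := out = load_requested_alt r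
instance (r : String) (out : List String × List String) : Decidable (Spec_load_requested r out) := by unfold Spec_load_requested; infer_instance

-- ===== CLAIM (what is proved, stated in full; the proofs are below) =====
def Claim_equal_load_requested : Prop := ∀ (r : String), Dom_load_requested r → Pre_load_requested r → Spec_load_requested r (load_requested r)

-- ===== LEMMAS AND PROOFS =====

-- The heart of the proof: A's in_gt-flagged foldl accumulates exactly the
-- "enc"- and "pfb"-tagged components of B's event stream, for EVERY token list
-- (the raise branches of both ports leave the state/stream unchanged).
theorem foldA_classify : ∀ (toks enc pfbs : List String),
    (toks.foldl stepA (enc, pfbs, false)).1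
        = enc ++ ((classifyB toks).filter (fun p => p.1 == "enc")).map Prod.snd
    ∧ (toks.foldl stepA (enc, pfbs, false)).2.1
        = pfbs ++ ((classifyB toks).filter (fun p => p.1 == "pfb")).map Prod.snd
  | [], _, _ => by simp [classifyB]
  | i :: rest, enc, pfbs => by
    rw [List.foldl_cons, classifyB.eq_def]
    by_cases h : i = "<"
    · subst h
      have h1 : stepA (enc, pfbs, false) "<" = (enc, pfbs, true) := by simp [stepA]
      rw [h1]
      match rest with
      | [] => simp
      | t :: rest2 =>
        rw [List.foldl_cons]
        simp only [stepA]
        have ih := foldA_classify rest2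
        split_ifs <;>
          simp_all [List.append_assoc]
    · simp only [if_neg h, stepA]
      have ih := foldA_classify rest
      by_cases h2 : PySem.Str.startswith i "<<" = true
      · simp only [if_pos h2]
        split_ifs <;> simp_all [List.append_assoc]
      · simp only [if_neg h2]
        by_cases h3 : PySem.Str.startswith i "<[" = true
        · simp only [if_pos h3]
          simp_all [List.append_assoc]
        · simp only [if_neg h3]
          by_cases h4 : PySem.Str.startswith i "<" = true
          · simp only [if_pos h4]
            split_ifs <;> simp_all [List.append_assoc]
          · simp only [if_neg h4]
            simp_all
termination_by toks => toks.length

-- ===== VERDICT (by name: the statement is the Claim_ definition above) =====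
theorem load_requested_spec : Claim_equal_load_requested := by
  intro r _ _
  unfold Spec_load_requested load_requested load_requested_alt
  obtain ⟨he, hp⟩ := foldA_classify (tokenize r) [] []
  simp [he, hp]
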